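-- pv_equiv track=rewrite | github.com/scl1999/ecozeAI-censored | python/aiTesting/mpcffull/python_programs/3-product_descriptions.py | parse_step_2_output
-- ===== SOURCE A (Python) =====
-- def parse_step_2_output(text):
--     """
--     Parses:
--     *pass_or_fail: [Pass/Fail]
--     *description: [text]
--     Returns: (status, description)
--     """
--     if not text:
--         return None, None
--
--     status = None
--     description = None
--
--     # Simple line parsing
--     lines = text.split('\n')
--     for line in lines:
--         line = line.strip()
--         if line.lower().startswith("*pass_or_fail:"):
--             val = line.split(":", 1)[1].strip().lower()
--             if "pass" in val:
--                 status = "Pass"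
--             else:
--                 status = "Fail"
--         elif line.lower().startswith("*description:"):
--             description = line.split(":", 1)[1].strip()
--             # Handle quotes
--             if description.startswith('"') and description.endswith('"'):
--                 description = description[1:-1].strip()
--
--     return status, description
-- ===== SOURCE B (Python) =====
-- def parse_step_2_output(text):
--     """Same parse, but instead of folding state over every line, scan the
--     stripped lines backwards and take the first (i.e. last-occurring) match
--     for each field independently."""
--     if not text:
--         return None, None
--
--     lines = [ln.strip() for ln in text.split('\n')]
--
--     def tail(line):
--         return line.split(":", 1)[1].strip()
--
--     status_line = next((ln for ln in reversed(lines)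
--                         if ln.lower().startswith("*pass_or_fail:")), None)
--     status = None
--     if status_line is not None:
--         status = "Pass" if "pass" in tail(status_line).lower() else "Fail"
--
--     desc_line = next((ln for ln in reversed(lines)
--                       if ln.lower().startswith("*description:")), None)
--     description = None
--     if desc_line is not None:
--         description = tail(desc_line)
--         if description.startswith('"') and description.endswith('"'):
--             description = description[1:-1].strip()
--
--     return status, description
-- ===== Notes on version B (the rewrite author's own statement) =====
-- stated objective: alternative
-- what changed: Replaced A's stateful line-by-line fold (last write wins for each field) with two independent backwards scans that take the first matching line from the end for status and description.
import Mathlib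
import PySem

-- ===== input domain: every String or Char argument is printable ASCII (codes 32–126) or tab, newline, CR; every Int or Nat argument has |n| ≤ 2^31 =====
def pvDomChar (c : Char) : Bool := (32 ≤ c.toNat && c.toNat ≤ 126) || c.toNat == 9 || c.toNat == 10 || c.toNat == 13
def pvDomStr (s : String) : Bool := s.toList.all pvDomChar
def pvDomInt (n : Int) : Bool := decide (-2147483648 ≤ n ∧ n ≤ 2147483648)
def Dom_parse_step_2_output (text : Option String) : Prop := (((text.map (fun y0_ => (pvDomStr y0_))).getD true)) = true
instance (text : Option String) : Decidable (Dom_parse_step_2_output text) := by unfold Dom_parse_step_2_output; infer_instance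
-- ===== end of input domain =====

-- B replaces A's stateful forward fold by two independent backwards first-match scans (alternative decomposition, same cost).

-- ===== PORT A =====
-- A's loop body: strip the line, then update (status, description) in place.
def pvStepA (st : Option String × Option String) (rawline : String) : Option String × Option String :=
  let line := PySem.Str.strip rawline
  if PySem.Str.startswith (PySem.Str.lower line) "*pass_or_fail:" then
    let val := PySem.Str.lower (PySem.Str.strip (((PySem.Str.splitMax? line ":" 1).getD []).getD 1 ""))
    if PySem.Str.isIn "pass" val then (some "Pass", st.2) else (some "Fail", st.2)
  else if PySem.Str.startswith (PySem.Str.lower line) "*description:" then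
    let d := PySem.Str.strip (((PySem.Str.splitMax? line ":" 1).getD []).getD 1 "")
    let d := if PySem.Str.startswith d "\"" && PySem.Str.endswith d "\"" then
               PySem.Str.strip (PySem.Str.slice d (some 1) (some (-1))) else d
    (st.1, some d)
  else st

def parse_step_2_output (text : Option String) : Option String × Option String :=
  match text with
  | none => (none, none)
  | some t =>
    if t = "" then (none, none)
    else ((PySem.Str.split? t "\n").getD []).foldl pvStepA (none, none)

-- ===== PORT B =====
def pvIsStatusLine (line : String) : Bool := PySem.Str.startswith (PySem.Str.lower line) "*pass_or_fail:"
def pvIsDescLine (line : String) : Bool := PySem.Str.startswith (PySem.Str.lower line) "*description:"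
def pvTail (line : String) : String := PySem.Str.strip (((PySem.Str.splitMax? line ":" 1).getD []).getD 1 "")
def pvMkStatus (line : String) : String :=
  if PySem.Str.isIn "pass" (PySem.Str.lower (pvTail line)) then "Pass" else "Fail"
def pvMkDesc (line : String) : String :=
  let d := pvTail line
  if PySem.Str.startswith d "\"" && PySem.Str.endswith d "\"" then
    PySem.Str.strip (PySem.Str.slice d (some 1) (some (-1)))
  else d

def parse_step_2_output_alt (text : Option String) : Option String × Option String :=
  match text with
  | none => (none, none)
  | some t =>
    if t = "" then (none, none)
    else
      let lines := ((PySem.Str.split? t "\n").getD []).map PySem.Str.strip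
      ((lines.reverse.find? pvIsStatusLine).map pvMkStatus,
       (lines.reverse.find? pvIsDescLine).map pvMkDesc)

-- ===== PRECONDITION & SPEC =====
def Spec_parse_step_2_output (text : Option String) (out : Option String × Option String) : Prop := out = parse_step_2_output_alt text
instance (text : Option String) (out : Option String × Option String) : Decidable (Spec_parse_step_2_output text out) := by unfold Spec_parse_step_2_output; infer_instance

-- ===== CLAIM (what is proved, stated in full; the proofs are below) =====
def Claim_equal_parse_step_2_output : Prop := ∀ (text : Option String), Dom_parse_step_2_output text → Spec_parse_step_2_output text (parse_step_2_output text)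

-- ===== LEMMAS AND PROOFS =====

-- A's step on an already-stripped line.
def pvStepA' (st : Option String × Option String) (line : String) : Option String × Option String :=
  if pvIsStatusLine line then (some (pvMkStatus line), st.2)
  else if pvIsDescLine line then (st.1, some (pvMkDesc line))
  else st

theorem pvStepA_eq (st : Option String × Option String) (rawline : String) :
    pvStepA st rawline = pvStepA' st (PySem.Str.strip rawline) := by
  simp only [pvStepA, pvStepA', pvIsStatusLine, pvIsDescLine, pvMkStatus, pvMkDesc, pvTail]
  split_ifs <;> rfl

-- A line cannot match both prefixes (they differ at their second character).
theorem pvLine_not_both (l : String) (h : pvIsStatusLine l = true) : pvIsDescLine l = false := by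
  by_contra hc
  rw [Bool.not_eq_false] at hc
  rw [pvIsStatusLine, PySem.Str.startswith_eq, PySem.Chars.startswith_iff] at h
  rw [pvIsDescLine, PySem.Str.startswith_eq, PySem.Chars.startswith_iff] at hc
  rcases List.prefix_or_prefix_of_prefix h hc with hpq | hpq <;> revert hpq <;> decide

theorem pvFold_fst (ls : List String) (st : Option String × Option String) :
    (ls.foldl pvStepA' st).1 = ((ls.reverse.find? pvIsStatusLine).map pvMkStatus).or st.1 := by
  induction ls generalizing st with
  | nil => simp
  | cons l ls ih =>
    rw [List.foldl_cons, ih, List.reverse_cons, List.find?_append]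
    cases h : ls.reverse.find? pvIsStatusLine with
    | some x => simp
    | none =>
      by_cases hp : pvIsStatusLine l <;> by_cases hq : pvIsDescLine l <;>
        simp [pvStepA', hp, hq, List.find?]

theorem pvFold_snd (ls : List String) (st : Option String × Option String) :
    (ls.foldl pvStepA' st).2 = ((ls.reverse.find? pvIsDescLine).map pvMkDesc).or st.2 := by
  induction ls generalizing st with
  | nil => simp
  | cons l ls ih =>
    rw [List.foldl_cons, ih, List.reverse_cons, List.find?_append]
    cases h : ls.reverse.find? pvIsDescLine with
    | some x => simp
    | none =>
      by_cases hp : pvIsStatusLine l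
      · simp [pvStepA', hp, pvLine_not_both l hp, List.find?]
      · by_cases hq : pvIsDescLine l <;> simp [pvStepA', hp, hq, List.find?]

-- ===== VERDICT (by name: the statement is the Claim_ definition above) =====
theorem parse_step_2_output_spec : Claim_equal_parse_step_2_output := by
  intro text _
  unfold Spec_parse_step_2_output parse_step_2_output parse_step_2_output_alt
  cases text with
  | none => rfl
  | some t =>
    by_cases ht : t = ""
    · simp [ht]
    · simp only [ht, if_false]
      have hmap : (((PySem.Str.split? t "\n").getD []) : List String).foldl pvStepA (none, none)
          = ((((PySem.Str.split? t "\n").getD []) : List String).map PySem.Str.strip).foldl pvStepA' (none, none) := by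
        rw [List.foldl_map]
        exact List.foldl_ext _ _ _ (fun st l _ => pvStepA_eq st l)
      refine Prod.ext ?_ ?_
      · rw [hmap, pvFold_fst]; simp
      · rw [hmap, pvFold_snd]; simp
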